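-- pv_equiv track=rewrite | github.com/drizztSun/common_project | PythonLeetcode/leetcodeM/763_PartitionLabels.py | doit_sort
-- ===== SOURCE A (Python) =====
-- def doit_sort(S: str) -> list:
--
--     letter_range = {}
--     for i in range(len(S)):
--         if S[i] not in letter_range:
--             letter_range[S[i]] = [i, i]
--         else:
--             letter_range[S[i]][1] = i
--
--     vals = [c for c in letter_range.values()]
--     vals.sort(key=lambda a: a[0])
--
--     res = []
--     s, e = vals[0]
--     for i, v in enumerate(vals):
--         if v[0] > e:
--             res.append((s, e))
--             s, e = v[0], v[1]
--         elif v[1] > e: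
--             e = v[1]
--
--         if i == len(vals) - 1:
--             res.append((s, e))
--
--     return [e - s + 1 for s, e in res]
-- ===== SOURCE B (Python) =====
-- def doit_sort(S: str) -> list:
--     last = {c: i for i, c in enumerate(S)}
--     res = []
--     start = 0
--     end = 0
--     for i, c in enumerate(S):
--         end = max(end, last[c])
--         if i == end:
--             res.append(i - start + 1)
--             start = i + 1
--     return res
-- ===== Notes on version B (the rewrite author's own statement) =====
-- stated objective: idiomatic
-- what changed: Replaced A's build-per-char-interval-dict + sort + interval-merge pass with the standard single left-to-right window sweep over a last-occurrence map (end = max(end,last[c]); cut when i == end).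
import Mathlib
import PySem

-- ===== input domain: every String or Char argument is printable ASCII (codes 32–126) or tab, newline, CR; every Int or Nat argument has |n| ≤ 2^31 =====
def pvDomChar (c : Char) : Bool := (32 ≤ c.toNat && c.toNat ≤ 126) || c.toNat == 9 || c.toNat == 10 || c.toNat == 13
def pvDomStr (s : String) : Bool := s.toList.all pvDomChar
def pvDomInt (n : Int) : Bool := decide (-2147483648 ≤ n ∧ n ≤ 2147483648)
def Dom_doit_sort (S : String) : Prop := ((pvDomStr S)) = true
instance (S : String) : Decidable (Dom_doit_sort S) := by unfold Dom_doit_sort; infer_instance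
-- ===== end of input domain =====

-- B replaces A's per-char interval dict + sort + interval merge by the standard single
-- left-to-right window sweep over a last-occurrence map (idiomatic; same return value).

-- ===== PORT A =====
-- the body of A's merge loop (the `if v[0] > e: … elif v[1] > e: …` branch), as a helper
def mstep (st : List (Int × Int) × Int × Int) (v : Int × Int) : List (Int × Int) × Int × Int :=
  if v.1 > st.2.2 then (st.1 ++ [(st.2.1, st.2.2)], v.1, v.2)
  else if v.2 > st.2.2 then (st.1, st.2.1, v.2)
  else (st.1, st.2.1, st.2.2)

def doit_sort (S : String) : List Int :=
  let l := S.toList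
  -- for i in range(len(S)): build letter_range; S[i] is always in range here, so pyGetD is exact
  let letter_range : PySem.Dict Char (Int × Int) :=
    (PySem.List.pyRange 0 (PySem.List.len l) 1).foldl
      (fun d i =>
        let c := PySem.List.pyGetD l i 'a'
        if d.contains c then d.modify c (0, 0) (fun p => (p.1, i)) else d.insert c (i, i))
      PySem.Dict.empty
  let vals := PySem.List.sorted letter_range.values (fun a => a.1)
  match vals with
  | [] => []   -- Python raises IndexError at `vals[0]` here (only when S = ""); excluded by Pre_
  | v0 :: _ =>
    let st := (PySem.List.enumerate vals 0).foldl
      (fun st iv =>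
        let st' := mstep st iv.2
        if iv.1 == (vals.length : Int) - 1 then (st'.1 ++ [(st'.2.1, st'.2.2)], st'.2) else st')
      ([], v0.1, v0.2)
    st.1.map (fun p => p.2 - p.1 + 1)

-- ===== PORT B =====
def doit_sort_alt (S : String) : List Int :=
  let last : PySem.Dict Char Int :=
    (PySem.List.enumerate S.toList 0).foldl (fun d p => d.insert p.2 p.1) PySem.Dict.empty
  let st := (PySem.List.enumerate S.toList 0).foldl
    (fun st p =>
      let e := max st.2.2 (last.getD p.2 0)   -- last[c]: the key is always present (c ∈ S)
      if p.1 == e then (st.1 ++ [p.1 - st.2.1 + 1], p.1 + 1, e) else (st.1, st.2.1, e))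
    (([] : List Int), (0 : Int), (0 : Int))
  st.1

-- ===== PRECONDITION & SPEC =====
-- Pre_ excludes only the empty string, on which A raises IndexError (vals[0] of an empty list).
def Pre_doit_sort (S : String) : Prop := S ≠ ""
instance (S : String) : Decidable (Pre_doit_sort S) := by unfold Pre_doit_sort; infer_instance
def pvWitness_doit_sort : String := "ababcbaca"

def Spec_doit_sort (S : String) (out : List Int) : Prop := out = doit_sort_alt S
instance (S : String) (out : List Int) : Decidable (Spec_doit_sort S out) := by unfold Spec_doit_sort; infer_instance

-- ===== CLAIM (what is proved, stated in full; the proofs are below) =====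
def Claim_equal_doit_sort : Prop := ∀ (S : String), Dom_doit_sort S → Pre_doit_sort S → Spec_doit_sort S (doit_sort S)

-- ===== LEMMAS AND PROOFS =====

-- first-occurrence index of c in l, as Int
def fI (l : List Char) (c : Char) : Int := (List.idxOf c l : Int)
-- last-occurrence index of c in l (Nat form and Int form)
def lIN (l : List Char) (c : Char) : Nat := l.length - 1 - List.idxOf c l.reverse
def lI (l : List Char) (c : Char) : Int := (lIN l c : Int)

-- B's sweep step with the dict lookup replaced by the last-occurrence function
def sstep (l : List Char) (st : List Int × Int × Int) (p : Int × Char) : List Int × Int × Int :=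
  let e := max st.2.2 (lI l p.2)
  if p.1 == e then (st.1 ++ [p.1 - st.2.1 + 1], p.1 + 1, e) else (st.1, st.2.1, e)

-- A's letter_range dict, as a fold over enumerate
def adict (l : List Char) : PySem.Dict Char (Int × Int) :=
  (PySem.List.enumerate l 0).foldl
    (fun d p => if d.contains p.2 then d.modify p.2 (0, 0) (fun q => (q.1, p.1)) else d.insert p.2 (p.1, p.1))
    PySem.Dict.empty

theorem idxOf_le_getElem (l : List Char) (c : Char) (i : Nat) (h : i < l.length) (hc : l[i] = c) :
    List.idxOf c l ≤ i := by
  by_contra hlt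
  push Not at hlt
  have h2 : i < List.findIdx (· == c) l := by simpa only [List.idxOf] using hlt
  have := List.not_of_lt_findIdx h2
  simp only [beq_eq_false_iff_ne, ne_eq] at this
  exact absurd hc this

theorem lIN_lt (l : List Char) (c : Char) (h : c ∈ l) : lIN l c < l.length := by
  have h0 : 0 < l.length := List.length_pos_of_mem h
  unfold lIN; omega

theorem le_lIN (l : List Char) (c : Char) (i : Nat) (h : i < l.length) (hc : l[i] = c) :
    i ≤ lIN l c := by
  unfold lIN
  have h2 : l.length - 1 - i < l.reverse.length := by simp; omega
  have h3 : l.reverse[l.length - 1 - i]'h2 = c := by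
    rw [List.getElem_reverse]
    have heq : l.length - 1 - (l.length - 1 - i) = i := by omega
    simp only [heq]
    exact hc
  have := idxOf_le_getElem l.reverse c _ h2 h3
  omega

theorem lIN_append_self (l : List Char) (x : Char) : lIN (l ++ [x]) x = l.length := by
  simp [lIN, List.reverse_append]

theorem lIN_append_ne (l : List Char) (x c : Char) (h : c ≠ x) : lIN (l ++ [x]) c = lIN l c := by
  have hx : (x == c) = false := by simpa using fun e => h e.symm
  simp [lIN, List.reverse_append, List.idxOf_cons, hx]
  omega

theorem fI_append_mem (l : List Char) (x c : Char) (h : c ∈ l) : fI (l ++ [x]) c = fI l c := by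
  simp [fI, List.idxOf_append_of_mem h]

theorem fI_append_self (l : List Char) (x : Char) (h : x ∉ l) : fI (l ++ [x]) x = (l.length : Int) := by
  simp [fI, List.idxOf_append, h]

theorem adict_append (l : List Char) (x : Char) :
    adict (l ++ [x]) = (if (adict l).contains x then (adict l).modify x (0,0) (fun q => (q.1, (l.length : Int)))
      else (adict l).insert x ((l.length : Int), (l.length : Int))) := by
  simp [adict, PySem.List.enumerate_append]

theorem adict_keys (l : List Char) : (adict l).keys = PySem.Set.ofList l := by
  induction l using List.reverseRecOn with
  | nil => simp [adict, PySem.List.enumerate_nil, PySem.Dict.keys_empty]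
  | append_singleton l x ih =>
    rw [adict_append, PySem.Set.ofList_eq_foldl, List.foldl_append]
    rw [← PySem.Set.ofList_eq_foldl]
    by_cases hx : x ∈ l
    · have hc : (adict l).contains x = true := by
        rw [PySem.Dict.contains_eq_decide_mem_keys, ih]; simp [PySem.Set.mem_ofList, hx]
      rw [if_pos hc]
      rw [PySem.Dict.keys_modify]
      rw [PySem.Dict.keys_insert_of_contains _ _ hc, ih]
      simp [PySem.Set.add, PySem.Set.contains, PySem.Set.mem_ofList, hx]
    · have hc : (adict l).contains x = false := by
        rw [PySem.Dict.contains_eq_decide_mem_keys, ih]; simp [PySem.Set.mem_ofList, hx]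
      rw [if_neg (by simp [hc])]
      rw [PySem.Dict.keys_insert_of_not_contains _ _ hc, ih]
      simp [PySem.Set.add, PySem.Set.contains, PySem.Set.mem_ofList, hx]

theorem adict_nodup (l : List Char) : (adict l).keys.Nodup := by
  rw [adict_keys]; exact PySem.Set.nodup_ofList l

theorem adict_getD (l : List Char) (c : Char) (h : c ∈ l) :
    (adict l).getD c (0, 0) = (fI l c, lI l c) := by
  induction l using List.reverseRecOn with
  | nil => simp at h
  | append_singleton l x ih =>
    rw [adict_append]
    by_cases hcx : c = x
    · subst hcx
      by_cases hx : c ∈ l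
      · have hc : (adict l).contains c = true := by
          rw [PySem.Dict.contains_eq_decide_mem_keys, adict_keys]; simp [PySem.Set.mem_ofList, hx]
        rw [if_pos hc, PySem.Dict.getD_modify]
        rw [if_pos rfl, ih hx]
        simp [fI_append_mem l c c hx, lI, lIN_append_self]
      · have hc : (adict l).contains c = false := by
          rw [PySem.Dict.contains_eq_decide_mem_keys, adict_keys]; simp [PySem.Set.mem_ofList, hx]
        rw [if_neg (by simp [hc]), PySem.Dict.getD_insert]
        rw [if_pos rfl]
        simp [fI_append_self l c hx, lI, lIN_append_self]
    · have hcl : c ∈ l := by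
        rcases List.mem_append.1 h with h' | h'
        · exact h'
        · simp at h'; exact absurd h' hcx
      by_cases hx : x ∈ l
      · have hc : (adict l).contains x = true := by
          rw [PySem.Dict.contains_eq_decide_mem_keys, adict_keys]; simp [PySem.Set.mem_ofList, hx]
        rw [if_pos hc, PySem.Dict.getD_modify, if_neg hcx, ih hcl]
        simp [fI_append_mem l x c hcl, lI, lIN_append_ne l x c hcx]
      · have hc : (adict l).contains x = false := by
          rw [PySem.Dict.contains_eq_decide_mem_keys, adict_keys]; simp [PySem.Set.mem_ofList, hx]
        rw [if_neg (by simp [hc]), PySem.Dict.getD_insert, if_neg hcx, ih hcl]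
        simp [fI_append_mem l x c hcl, lI, lIN_append_ne l x c hcx]

theorem bdict_getD (l : List Char) (c : Char) (h : c ∈ l) :
    ((PySem.List.enumerate l 0).foldl (fun d p => d.insert p.2 p.1) PySem.Dict.empty).getD c 0
      = lI l c := by
  induction l using List.reverseRecOn with
  | nil => simp at h
  | append_singleton l x ih =>
    rw [PySem.List.enumerate_append, List.foldl_append]
    simp only [PySem.List.enumerate, List.foldl]
    rw [PySem.Dict.getD_insert]
    by_cases hcx : c = x
    · subst hcx
      rw [if_pos rfl]
      simp [lI, lIN_append_self]
    · have hcl : c ∈ l := by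
        rcases List.mem_append.1 h with h' | h'
        · exact h'
        · simp at h'; exact absurd h' hcx
      rw [if_neg hcx, ih hcl]
      simp [lI, lIN_append_ne l x c hcx]

theorem foldl_add_exists (t : List Char) : ∀ (s : List Char),
    ∃ r, List.foldl PySem.Set.add s t = s ++ r ∧ ∀ c ∈ r, c ∈ t := by
  induction t with
  | nil => intro s; exact ⟨[], by simp⟩
  | cons y t ih =>
    intro s
    rcases ih (PySem.Set.add s y) with ⟨r, hr, hmem⟩
    by_cases hy : y ∈ s
    · refine ⟨r, ?_, fun c hc => List.mem_cons_of_mem _ (hmem c hc)⟩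
      simpa [PySem.Set.add, PySem.Set.contains, hy] using hr
    · refine ⟨y :: r, ?_, ?_⟩
      · simp only [List.foldl_cons]
        rw [hr]
        simp [PySem.Set.add, PySem.Set.contains, hy]
      · intro c hc
        rcases List.mem_cons.1 hc with rfl | hc
        · exact List.mem_cons_self
        · exact List.mem_cons_of_mem _ (hmem c hc)

theorem ofList_cons_head (x : Char) (t : List Char) :
    ∃ r, PySem.Set.ofList (x :: t) = x :: r ∧ ∀ c ∈ r, c ∈ t := by
  rw [PySem.Set.ofList_eq_foldl]
  simp only [List.foldl_cons]
  have : PySem.Set.add [] x = [x] := by simp [PySem.Set.add, PySem.Set.contains]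
  rw [this]
  rcases foldl_add_exists t [x] with ⟨r, hr, hmem⟩
  exact ⟨r, by simpa using hr, hmem⟩

theorem ofList_append_singleton (l : List Char) (x : Char) :
    PySem.Set.ofList (l ++ [x]) = PySem.Set.add (PySem.Set.ofList l) x := by
  rw [PySem.Set.ofList_eq_foldl, List.foldl_append, ← PySem.Set.ofList_eq_foldl]
  simp only [List.foldl]

theorem pairwise_fI (l : List Char) :
    (PySem.Set.ofList l).Pairwise (fun a b => fI l a < fI l b) := by
  induction l using List.reverseRecOn with
  | nil => simp [PySem.Set.ofList]
  | append_singleton l x ih =>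
    rw [ofList_append_singleton]
    by_cases hx : x ∈ l
    · have : PySem.Set.add (PySem.Set.ofList l) x = PySem.Set.ofList l := by
        simp [PySem.Set.add, PySem.Set.contains, PySem.Set.mem_ofList, hx]
      rw [this]
      refine ih.imp_of_mem ?_
      intro a b ha hb hab
      have ha' : a ∈ l := (PySem.Set.mem_ofList l a).1 ha
      have hb' : b ∈ l := (PySem.Set.mem_ofList l b).1 hb
      rwa [fI_append_mem l x a ha', fI_append_mem l x b hb']
    · have : PySem.Set.add (PySem.Set.ofList l) x = PySem.Set.ofList l ++ [x] := by
        simp [PySem.Set.add, PySem.Set.contains, PySem.Set.mem_ofList, hx]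
      rw [this, List.pairwise_append]
      refine ⟨?_, by simp, ?_⟩
      · refine ih.imp_of_mem ?_
        intro a b ha hb hab
        have ha' : a ∈ l := (PySem.Set.mem_ofList l a).1 ha
        have hb' : b ∈ l := (PySem.Set.mem_ofList l b).1 hb
        rwa [fI_append_mem l x a ha', fI_append_mem l x b hb']
      · intro a ha b hb
        simp only [List.mem_singleton] at hb
        have ha' : a ∈ l := (PySem.Set.mem_ofList l a).1 ha
        rw [hb, fI_append_mem l x a ha', fI_append_self l x hx]
        have : List.idxOf a l < l.length := List.idxOf_lt_length_of_mem ha'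
        simp [fI]
        omega

theorem adict_values (l : List Char) :
    (adict l).values = (PySem.Set.ofList l).map (fun c => (fI l c, lI l c)) := by
  rw [PySem.Dict.values_eq_map_keys (adict l) (adict_nodup l) (0, 0), adict_keys]
  apply List.map_congr_left
  intro c hc
  exact adict_getD l c ((PySem.Set.mem_ofList l c).1 hc)

theorem vals_eq (l : List Char) :
    PySem.List.sorted (adict l).values (fun a => a.1) =
      (PySem.Set.ofList l).map (fun c => (fI l c, lI l c)) := by
  rw [adict_values]
  apply PySem.List.sorted_eq_of_perm_of_pairwise_lt _ _ _ (List.Perm.refl _)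
  rw [List.pairwise_map]
  exact pairwise_fI l

theorem filt_eq (l : List Char) :
    (PySem.List.enumerate l 0).filter (fun p => fI l p.2 == p.1) =
      (PySem.Set.ofList l).map (fun c => (fI l c, c)) := by
  induction l using List.reverseRecOn with
  | nil => simp [PySem.List.enumerate_nil, PySem.Set.ofList]
  | append_singleton l x ih =>
    rw [PySem.List.enumerate_append, List.filter_append]
    have hfiltl : (PySem.List.enumerate l 0).filter (fun p => fI (l ++ [x]) p.2 == p.1)
        = (PySem.List.enumerate l 0).filter (fun p => fI l p.2 == p.1) := by
      apply List.filter_congr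
      intro p hp
      rcases (PySem.List.mem_enumerate_iff l 0 p).1 hp with ⟨k, hk, rfl⟩
      simp only [fI_append_mem l x _ (List.getElem_mem hk)]
    rw [hfiltl, ih, ofList_append_singleton]
    by_cases hx : x ∈ l
    · have hadd : PySem.Set.add (PySem.Set.ofList l) x = PySem.Set.ofList l := by
        simp [PySem.Set.add, PySem.Set.contains, PySem.Set.mem_ofList, hx]
      rw [hadd]
      have : fI (l ++ [x]) x ≠ ((l.length : Int)) := by
        rw [fI_append_mem l x x hx]
        have : List.idxOf x l < l.length := List.idxOf_lt_length_of_mem hx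
        simp [fI]; omega
      have hmap : List.map (fun c => (fI (l ++ [x]) c, c)) (PySem.Set.ofList l)
          = List.map (fun c => (fI l c, c)) (PySem.Set.ofList l) := by
        apply List.map_congr_left
        intro c hc
        rw [fI_append_mem l x c ((PySem.Set.mem_ofList l c).1 hc)]
      rw [hmap]
      simp only [PySem.List.enumerate, List.filter]
      have hb : (fI (l ++ [x]) x == ((l.length : Int))) = false := by simpa using this
      simp [hb]
    · have hadd : PySem.Set.add (PySem.Set.ofList l) x = PySem.Set.ofList l ++ [x] := by
        simp [PySem.Set.add, PySem.Set.contains, PySem.Set.mem_ofList, hx]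
      rw [hadd]
      have : fI (l ++ [x]) x = ((l.length : Int)) := by
        rw [fI_append_self l x hx]
      have hmap : List.map (fun c => (fI (l ++ [x]) c, c)) (PySem.Set.ofList l ++ [x])
          = List.map (fun c => (fI l c, c)) (PySem.Set.ofList l) ++ [(fI (l ++ [x]) x, x)] := by
        rw [List.map_append]
        congr 1
        apply List.map_congr_left
        intro c hc
        rw [fI_append_mem l x c ((PySem.Set.mem_ofList l c).1 hc)]
      rw [hmap]
      simp only [PySem.List.enumerate, List.filter]
      have hb : (fI (l ++ [x]) x == ((l.length : Int))) = true := by simpa using this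
      simp [this]

theorem A_bridge (l : List Char) :
    (PySem.List.pyRange 0 (PySem.List.len l) 1).foldl
      (fun d i =>
        let c := PySem.List.pyGetD l i 'a'
        if d.contains c then d.modify c (0, 0) (fun p => (p.1, i)) else d.insert c (i, i))
      PySem.Dict.empty = adict l := by
  rw [adict, PySem.List.enumerate_eq_map_pyRange l 'a', List.foldl_map]

theorem fold_nocheck (W : List (Int × Int)) (m : Int) (hm : ∀ p ∈ PySem.List.enumerate W 0, p.1 ≠ m)
    (init : List (Int × Int) × Int × Int) :
    (PySem.List.enumerate W 0).foldl
      (fun st iv =>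
        let st' := mstep st iv.2
        if iv.1 == m then (st'.1 ++ [(st'.2.1, st'.2.2)], st'.2) else st') init
    = W.foldl mstep init := by
  have h1 : (PySem.List.enumerate W 0).foldl
      (fun st iv =>
        let st' := mstep st iv.2
        if iv.1 == m then (st'.1 ++ [(st'.2.1, st'.2.2)], st'.2) else st') init
      = (PySem.List.enumerate W 0).foldl (fun st iv => mstep st iv.2) init := by
    apply PySem.List.foldl_congr_mem
    intro acc p hp
    have := hm p hp
    simp [this]
  rw [h1]
  have h2 : W.foldl mstep init = ((PySem.List.enumerate W 0).map (·.2)).foldl mstep init := by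
    rw [PySem.List.map_snd_enumerate]
  rw [h2, List.foldl_map]

theorem lastcheck (V : List (Int × Int)) (hne : V ≠ []) (init : List (Int × Int) × Int × Int) :
    (PySem.List.enumerate V 0).foldl
      (fun st iv =>
        let st' := mstep st iv.2
        if iv.1 == (V.length : Int) - 1 then (st'.1 ++ [(st'.2.1, st'.2.2)], st'.2) else st')
      init
    = ((V.foldl mstep init).1 ++ [((V.foldl mstep init).2.1, (V.foldl mstep init).2.2)],
       (V.foldl mstep init).2) := by
  induction V using List.reverseRecOn with
  | nil => exact absurd rfl hne
  | append_singleton W v _ =>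
    rw [PySem.List.enumerate_append, List.foldl_append]
    have hm : ∀ p ∈ PySem.List.enumerate W 0, p.1 ≠ (W ++ [v]).length - 1 := by
      intro p hp
      rcases (PySem.List.mem_enumerate_iff W 0 p).1 hp with ⟨k, hk, rfl⟩
      simp
      omega
    rw [fold_nocheck W _ hm init]
    simp only [PySem.List.enumerate, List.foldl]
    have : ((0 + (W.length : Int)) == ((W ++ [v]).length : Int) - 1) = true := by simp
    rw [this]
    simp [List.foldl_append]

theorem mstep_e_mono (st : List (Int × Int) × Int × Int) (v : Int × Int) (hv : v.1 ≤ v.2) :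
    st.2.2 ≤ (mstep st v).2.2 ∧ v.2 ≤ (mstep st v).2.2 := by
  unfold mstep
  split_ifs with h1 h2 <;> simp <;> omega

theorem skip_fold (l : List Char) (ps : List (Int × Char)) :
    ∀ (res : List (Int × Int)) (s e : Int),
    ps.Pairwise (fun p q => p.1 < q.1) →
    (∀ p ∈ ps, p.1 ≤ lI l p.2) →
    (∀ p ∈ ps, fI l p.2 ≠ p.1 →
      lI l p.2 ≤ e ∨ ∃ q ∈ ps, q.1 < p.1 ∧ fI l q.2 = q.1 ∧ lI l q.2 = lI l p.2) →
    (ps.filter (fun p => fI l p.2 == p.1)).foldl (fun st p => mstep st (p.1, lI l p.2)) (res, s, e)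
      = ps.foldl (fun st p => mstep st (p.1, lI l p.2)) (res, s, e) := by
  induction ps with
  | nil => intros; rfl
  | cons p t ih =>
    intro res s e hsort hpv hinv
    by_cases hk : fI l p.2 = p.1
    · have hb : (fI l p.2 == p.1) = true := by simpa using hk
      rw [List.filter_cons]
      simp only [hb, if_true]
      simp only [List.foldl_cons]
      have hm := mstep_e_mono (res, s, e) (p.1, lI l p.2) (hpv p List.mem_cons_self)
      rcases hst : mstep (res, s, e) (p.1, lI l p.2) with ⟨res', s', e'⟩
      rw [hst] at hm
      simp only at hm
      apply ih res' s' e' (List.pairwise_cons.1 hsort).2 (fun q hq => hpv q (List.mem_cons_of_mem _ hq))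
      intro q hq hqk
      rcases hinv q (List.mem_cons_of_mem _ hq) hqk with h | ⟨r, hr, hlt, hrf, hrl⟩
      · exact Or.inl (le_trans h hm.1)
      · rcases List.mem_cons.1 hr with rfl | hr'
        · left; rw [← hrl]; exact hm.2
        · exact Or.inr ⟨r, hr', hlt, hrf, hrl⟩
    · have hb : (fI l p.2 == p.1) = false := by simpa using hk
      rw [List.filter_cons]
      simp only [hb]
      simp only [List.foldl_cons]
      -- p is a no-op for the full fold
      have hle : lI l p.2 ≤ e := by
        rcases hinv p (List.mem_cons_self) hk with h | ⟨q, hq, hlt, _, _⟩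
        · exact h
        · rcases List.mem_cons.1 hq with rfl | hq'
          · omega
          · have := (List.pairwise_cons.1 hsort).1 q hq'
            omega
      have hp1 : p.1 ≤ e := le_trans (hpv p List.mem_cons_self) hle
      have hnoop : mstep (res, s, e) (p.1, lI l p.2) = (res, s, e) := by
        unfold mstep
        simp only
        rw [if_neg (by omega), if_neg (by omega)]
      rw [hnoop]
      apply ih res s e (List.pairwise_cons.1 hsort).2 (fun q hq => hpv q (List.mem_cons_of_mem _ hq))
      intro q hq hqk
      rcases hinv q (List.mem_cons_of_mem _ hq) hqk with h | ⟨r, hr, hlt, hrf, hrl⟩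
      · exact Or.inl h
      · rcases List.mem_cons.1 hr with rfl | hr'
        · exact absurd hrf hk
        · exact Or.inr ⟨r, hr', hlt, hrf, hrl⟩

theorem ms (l : List Char) :
    ∀ (rest : List Char) (i : Nat) (resm : List (Int × Int)) (s : Int) (ress : List Int)
      (start : Int) (e : Int),
    (∀ (k : Nat) (h : k < rest.length),
        ((i : Int) + k) ≤ lI l rest[k] ∧ lI l rest[k] ≤ (i : Int) + rest.length - 1) →
    ((e = (i : Int) - 1 ∧ ress = (resm ++ [(s, e)]).map (fun p => p.2 - p.1 + 1) ∧ start = (i : Int)) ∨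
     ((i : Int) ≤ e ∧ e ≤ (i : Int) + rest.length - 1 ∧
        ress = resm.map (fun p => p.2 - p.1 + 1) ∧ start = s)) →
    ((PySem.List.enumerate rest i).foldl (sstep l) (ress, start, e)).1
      = (((PySem.List.enumerate rest i).foldl (fun st p => mstep st (p.1, lI l p.2)) (resm, s, e)).1
         ++ [(((PySem.List.enumerate rest i).foldl (fun st p => mstep st (p.1, lI l p.2)) (resm, s, e)).2.1,
             ((PySem.List.enumerate rest i).foldl (fun st p => mstep st (p.1, lI l p.2)) (resm, s, e)).2.2)]).map
          (fun p => p.2 - p.1 + 1) := by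
  intro rest
  induction rest with
  | nil =>
    intro i resm s ress start e _ hrel
    simp only [PySem.List.enumerate_nil, List.foldl_nil]
    rcases hrel with ⟨he, hress, _⟩ | ⟨h1, h2, _, _⟩
    · subst he; simpa using hress
    · simp at h2; omega
  | cons c t ih =>
    intro i resm s ress start e hv hrel
    have hL0 := hv 0 (by simp)
    have hL : (i : Int) ≤ lI l c ∧ lI l c ≤ (i : Int) + (t.length : Int) := by
      simp only [List.getElem_cons_zero, List.length_cons] at hL0
      push_cast at hL0
      constructor <;> omega
    rw [show (PySem.List.enumerate (c :: t) (i : Int)) = ((i : Int), c) :: PySem.List.enumerate t ((i : Int) + 1) from by simp [PySem.List.enumerate_cons]]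
    simp only [List.foldl_cons]
    have hvt : ∀ (k : Nat) (h : k < t.length),
        (((i+1 : Nat) : Int) + k) ≤ lI l t[k] ∧ lI l t[k] ≤ ((i+1 : Nat) : Int) + t.length - 1 := by
      intro k hk
      have := hv (k+1) (by simpa using Nat.succ_lt_succ hk)
      simp only [List.getElem_cons_succ, List.length_cons] at this
      push_cast at this ⊢
      constructor <;> omega
    have hcast1 : (((i+1 : Nat)) : Int) = (i : Int) + 1 := by push_cast; ring
    rcases hrel with ⟨he, hress, hstart⟩ | ⟨h1, h2, hress, hstart⟩
    · -- e = i - 1 : a new block starts at i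
      have hm : mstep (resm, s, e) ((i : Int), lI l c) = (resm ++ [(s, e)], (i : Int), lI l c) := by
        unfold mstep; simp only
        rw [if_pos (by omega)]
      have hmax : max e (lI l c) = lI l c := by omega
      rw [hm]
      by_cases hemit : (i : Int) = lI l c
      · have hs : sstep l (ress, start, e) ((i : Int), c) = (ress ++ [(i : Int) - start + 1], (i : Int) + 1, lI l c) := by
          unfold sstep; simp only [hmax]
          rw [if_pos (by simpa using hemit)]
        rw [hs]
        have := ih (i+1) (resm ++ [(s, e)]) (i : Int) (ress ++ [(i : Int) - start + 1]) ((i : Int) + 1) (lI l c) hvt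
          (Or.inl ⟨by rw [hcast1]; omega, by rw [hress, hstart]; simp [← hemit], by rw [hcast1]⟩)
        rw [hcast1] at this
        exact this
      · have hs : sstep l (ress, start, e) ((i : Int), c) = (ress, start, lI l c) := by
          unfold sstep; simp only [hmax]
          rw [if_neg (by simpa using hemit)]
        rw [hs]
        have := ih (i+1) (resm ++ [(s, e)]) (i : Int) ress (i : Int) (lI l c) hvt
          (Or.inr ⟨by rw [hcast1]; omega, by rw [hcast1]; omega, by rw [hress], rfl⟩)
        rw [hcast1] at this
        rw [hstart]
        exact this
    · -- i ≤ e : still inside the current block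
      have hm : mstep (resm, s, e) ((i : Int), lI l c) = (resm, s, max e (lI l c)) := by
        unfold mstep; simp only
        rw [if_neg (by omega)]
        by_cases hgt : lI l c > e
        · rw [if_pos hgt]; simp; omega
        · rw [if_neg hgt]; simp; omega
      rw [hm]
      have h2' : e ≤ (i : Int) + (t.length : Int) := by
        simp only [List.length_cons] at h2; push_cast at h2; omega
      by_cases hemit : (i : Int) = max e (lI l c)
      · have hs : sstep l (ress, start, e) ((i : Int), c) = (ress ++ [(i : Int) - start + 1], (i : Int) + 1, max e (lI l c)) := by
          unfold sstep; simp only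
          rw [if_pos (by simpa using hemit)]
        rw [hs]
        have := ih (i+1) resm s (ress ++ [(i : Int) - start + 1]) ((i : Int) + 1) (max e (lI l c)) hvt
          (Or.inl ⟨by rw [hcast1]; omega, by rw [hress, hstart]; simp [List.map_append]; omega, by rw [hcast1]⟩)
        rw [hcast1] at this
        exact this
      · have hs : sstep l (ress, start, e) ((i : Int), c) = (ress, start, max e (lI l c)) := by
          unfold sstep; simp only
          rw [if_neg (by simpa using hemit)]
        rw [hs]
        have := ih (i+1) resm s ress s (max e (lI l c)) hvt
          (Or.inr ⟨by rw [hcast1]; omega, by rw [hcast1]; omega, hress, rfl⟩)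
        rw [hcast1] at this
        rw [hstart]
        exact this

-- ===== VERDICT (by name: the statement is the Claim_ definition above) =====
theorem doit_sort_spec : Claim_equal_doit_sort := by
  intro S _ hpre
  unfold Spec_doit_sort
  have hl : S.toList ≠ [] := fun h => hpre (String.toList_eq_nil_iff.1 h)
  obtain ⟨x, t, hxt⟩ : ∃ x t, S.toList = x :: t := by
    cases h : S.toList with
    | nil => exact absurd h hl
    | cons a b => exact ⟨a, b, rfl⟩
  simp only [doit_sort, doit_sort_alt, A_bridge, vals_eq]
  obtain ⟨r, hr, hrt⟩ := ofList_cons_head x t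
  rw [← hxt] at hr
  rw [hr, List.map_cons]
  simp only []
  rw [lastcheck _ (List.cons_ne_nil _ _) _]
  -- B side: replace the dict lookup by lI
  have hB : (PySem.List.enumerate S.toList 0).foldl
      (fun (st : List Int × Int × Int) p =>
        if (p.1 == max st.2.2 (((PySem.List.enumerate S.toList 0).foldl (fun d p => d.insert p.2 p.1) PySem.Dict.empty).getD p.2 0)) = true then
          (st.1 ++ [p.1 - st.2.1 + 1], p.1 + 1, max st.2.2 (((PySem.List.enumerate S.toList 0).foldl (fun d p => d.insert p.2 p.1) PySem.Dict.empty).getD p.2 0))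
        else (st.1, st.2.1, max st.2.2 (((PySem.List.enumerate S.toList 0).foldl (fun d p => d.insert p.2 p.1) PySem.Dict.empty).getD p.2 0)))
      ([], 0, 0)
    = (PySem.List.enumerate S.toList 0).foldl (sstep S.toList) ([], 0, 0) := by
    apply PySem.List.foldl_congr_mem
    intro acc p hp
    rcases (PySem.List.mem_enumerate_iff S.toList 0 p).1 hp with ⟨k, hk, rfl⟩
    rw [bdict_getD S.toList _ (List.getElem_mem hk)]
    rfl
  rw [hB]
  -- facts about the head character and last occurrences
  have hfx : fI S.toList x = 0 := by rw [hxt]; simp [fI]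
  have hlix : (0 : Int) ≤ lI S.toList x := by unfold lI; positivity
  have hlixlt : lI S.toList x ≤ (t.length : Int) := by
    have hm : x ∈ S.toList := by rw [hxt]; exact List.mem_cons_self
    have := lIN_lt S.toList x hm
    unfold lI
    rw [hxt] at this ⊢
    simp only [List.length_cons] at this
    omega
  -- A's fold over the distinct intervals equals the same fold over every position
  have hskip : List.foldl mstep ([], fI S.toList x, lI S.toList x)
        ((fI S.toList x, lI S.toList x) :: List.map (fun c => (fI S.toList c, lI S.toList c)) r)
      = (PySem.List.enumerate S.toList 0).foldl (fun st p => mstep st (p.1, lI S.toList p.2))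
          ([], fI S.toList x, lI S.toList x) := by
    have hVmap : ((fI S.toList x, lI S.toList x) :: List.map (fun c => (fI S.toList c, lI S.toList c)) r)
        = List.map (fun c => (fI S.toList c, lI S.toList c)) (PySem.Set.ofList S.toList) := by
      rw [hr]; rfl
    rw [hVmap]
    have h1 : List.foldl mstep ([], fI S.toList x, lI S.toList x)
          (List.map (fun c => (fI S.toList c, lI S.toList c)) (PySem.Set.ofList S.toList))
        = List.foldl (fun st p => mstep st (p.1, lI S.toList p.2)) ([], fI S.toList x, lI S.toList x)
            (List.map (fun c => (fI S.toList c, c)) (PySem.Set.ofList S.toList)) := by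
      rw [List.foldl_map, List.foldl_map]
    rw [h1, ← filt_eq]
    apply skip_fold
    · exact PySem.List.pairwise_lt_enumerate S.toList 0
    · intro p hp
      rcases (PySem.List.mem_enumerate_iff S.toList 0 p).1 hp with ⟨k, hk, rfl⟩
      have := le_lIN S.toList (S.toList[k]) k hk rfl
      simp only [lI]
      simp
      omega
    · intro p hp hne
      rcases (PySem.List.mem_enumerate_iff S.toList 0 p).1 hp with ⟨k, hk, rfl⟩
      right
      have hmem : S.toList[k] ∈ S.toList := List.getElem_mem hk
      have hidx : List.idxOf S.toList[k] S.toList < S.toList.length := List.idxOf_lt_length_of_mem hmem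
      refine ⟨((List.idxOf S.toList[k] S.toList : Int), S.toList[k]), ?_, ?_, ?_, ?_⟩
      · rw [PySem.List.mem_enumerate_iff]
        refine ⟨List.idxOf S.toList[k] S.toList, hidx, ?_⟩
        rw [List.getElem_idxOf hidx]
        simp
      · have hle := idxOf_le_getElem S.toList (S.toList[k]) k hk rfl
        have : List.idxOf S.toList[k] S.toList ≠ k := by
          intro heq
          apply hne
          simp only [fI]
          simp [heq]
        simp
        omega
      · simp [fI]
      · rfl
  rw [hskip, hfx]
  rw [hxt] at hlix hlixlt ⊢
  simp only []
  rw [show PySem.List.enumerate (x :: t) 0 = ((0 : Int), x) :: PySem.List.enumerate t (0 + 1) from by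
    simp [PySem.List.enumerate_cons]]
  simp only [List.foldl_cons, zero_add]
  have hmhead : mstep ([], 0, lI (x :: t) x) ((0 : Int), lI (x :: t) x) = ([], 0, lI (x :: t) x) := by
    unfold mstep; simp only
    rw [if_neg (by simp; omega), if_neg (by simp)]
  have hmax0 : max (0 : Int) (lI (x :: t) x) = lI (x :: t) x := max_eq_right hlix
  have hcast1 : (((1 : Nat)) : Int) = (1 : Int) := by norm_num
  have hv : ∀ (k : Nat) (h : k < t.length),
      (((1 : Nat) : Int) + k) ≤ lI (x :: t) t[k] ∧ lI (x :: t) t[k] ≤ ((1 : Nat) : Int) + t.length - 1 := by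
    intro k hk
    have hk' : k + 1 < (x :: t).length := by simpa using Nat.succ_lt_succ hk
    have h1 := le_lIN (x :: t) (t[k]) (k + 1) hk' (by simp)
    have h2 := lIN_lt (x :: t) (t[k]) (List.mem_cons_of_mem _ (List.getElem_mem hk))
    simp only [List.length_cons] at h2
    unfold lI
    constructor <;> [push_cast; push_cast] <;> omega
  rw [hmhead]
  by_cases h0 : lI (x :: t) x = 0
  · have hshead : sstep (x :: t) ([], 0, 0) ((0 : Int), x) = ([(1 : Int)], 1, lI (x :: t) x) := by
      unfold sstep
      simp only [h0]
      rw [if_pos (by simp)]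
      norm_num
    rw [hshead]
    have := ms (x :: t) t 1 [] 0 [(1 : Int)] 1 (lI (x :: t) x) hv
      (Or.inl ⟨by rw [hcast1]; omega, by simp [h0], by rw [hcast1]⟩)
    rw [hcast1] at this
    exact this.symm
  · have hshead : sstep (x :: t) ([], 0, 0) ((0 : Int), x) = ([], 0, lI (x :: t) x) := by
      unfold sstep
      simp only [hmax0]
      rw [if_neg (by simpa using fun e => h0 e.symm)]
    rw [hshead]
    have := ms (x :: t) t 1 [] 0 [] 0 (lI (x :: t) x) hv
      (Or.inr ⟨by rw [hcast1]; omega, by rw [hcast1]; omega, by simp, rfl⟩)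
    rw [hcast1] at this
    exact this.symm
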